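-- pv_equiv track=rewrite | github.com/AMISTAD-lab/bias-in-data-source | abs_sum_mg.py | helper_abs_sum
-- ===== SOURCE A (Python) =====
-- def helper_abs_sum(hyp,pm_pair):
--     if len(hyp) == 1:
--         if pm_pair[0] == 0:
--             return [[max(pm_pair[1],-1*hyp[0])]]
--         else:
--             return [[pm_pair[0]]]
--     else:
--         permlist = []
--         vallist = list(range(max(-1*hyp[0],pm_pair[1]), pm_pair[0]+1))
--         for val in vallist:
--             if abs(val) == val:
--                 permlist += [[val]+perm for perm in helper_abs_sum(hyp[1:], [pm_pair[0]-val, pm_pair[1]])]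
--             else:
--                 permlist += [[val]+perm for perm in helper_abs_sum(hyp[1:], [pm_pair[0], pm_pair[1]-val])]
--         return permlist
-- ===== SOURCE B (Python) =====
-- def helper_abs_sum(hyp, pm_pair):
--     # Iterative level-by-level builder instead of recursion: a worklist of
--     # (prefix, p0, p1) states, expanded in order for each position but the last,
--     # then finalized with the base-case value.
--     states = [([], pm_pair[0], pm_pair[1])]
--     for h in hyp[:-1]:
--         states = [((prefix + [v], p0 - v, p1) if v >= 0 else (prefix + [v], p0, p1 - v))
--                   for (prefix, p0, p1) in states
--                   for v in range(max(-h, p1), p0 + 1)]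
--     last = hyp[-1]
--     return [prefix + [max(p1, -last) if p0 == 0 else p0] for (prefix, p0, p1) in states]
-- ===== Notes on version B (the rewrite author's own statement) =====
-- stated objective: alternative
-- what changed: Replaces A's depth-first recursion with an iterative level-by-level worklist of (prefix, p0, p1) states that is expanded in order for every position but the last and then finalized once with the base-case value.
-- outside the precondition, e.g. on helper_abs_sum([1], [5]): A returns [[5]], B raises IndexError
import Mathlib
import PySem

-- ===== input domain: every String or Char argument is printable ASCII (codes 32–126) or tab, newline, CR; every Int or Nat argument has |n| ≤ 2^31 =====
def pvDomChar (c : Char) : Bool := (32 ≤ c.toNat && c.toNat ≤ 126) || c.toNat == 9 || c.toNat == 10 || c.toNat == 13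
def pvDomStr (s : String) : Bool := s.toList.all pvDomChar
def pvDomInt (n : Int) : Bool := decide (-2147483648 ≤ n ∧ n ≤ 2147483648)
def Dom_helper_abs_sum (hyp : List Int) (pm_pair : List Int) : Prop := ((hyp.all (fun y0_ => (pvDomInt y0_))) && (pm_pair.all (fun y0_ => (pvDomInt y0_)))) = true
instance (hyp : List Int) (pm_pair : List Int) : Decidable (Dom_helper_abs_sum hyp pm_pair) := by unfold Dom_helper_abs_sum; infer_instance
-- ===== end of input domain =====

-- B replaces A's recursion by an iterative worklist of (prefix, p0, p1) states expanded
-- level by level and finalized once; objective: alternative decomposition, similar cost.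

-- ===== PORT A =====
-- Literal transliteration of A's recursion; the [] arm is unreachable under Pre_
-- (Python raises IndexError on hyp[0] there).
def helper_abs_sum (hyp : List Int) (pm_pair : List Int) : List (List Int) :=
  match hyp with
  | [] => []
  | [x] =>
    if (PySem.List.pyGet? pm_pair 0).getD 0 = 0 then
      [[max ((PySem.List.pyGet? pm_pair 1).getD 0) (-1 * x)]]
    else
      [[(PySem.List.pyGet? pm_pair 0).getD 0]]
  | h :: t =>
    let p0 := (PySem.List.pyGet? pm_pair 0).getD 0
    let p1 := (PySem.List.pyGet? pm_pair 1).getD 0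
    let vallist := PySem.List.pyRange (max (-1 * h) p1) (p0 + 1) 1
    vallist.foldl (fun permlist val =>
      if |val| = val then
        permlist ++ (helper_abs_sum t [p0 - val, p1]).map (fun perm => val :: perm)
      else
        permlist ++ (helper_abs_sum t [p0, p1 - val]).map (fun perm => val :: perm)) []

-- ===== PORT B =====
def helper_abs_sum_alt (hyp : List Int) (pm_pair : List Int) : List (List Int) :=
  let init : List (List Int × Int × Int) :=
    [([], (PySem.List.pyGet? pm_pair 0).getD 0, (PySem.List.pyGet? pm_pair 1).getD 0)]
  let states := (PySem.List.slice hyp none (some (-1))).foldl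
    (fun states h =>
      states.flatMap (fun s =>
        (PySem.List.pyRange (max (-h) s.2.2) (s.2.1 + 1) 1).map (fun v =>
          if v ≥ 0 then (s.1 ++ [v], s.2.1 - v, s.2.2) else (s.1 ++ [v], s.2.1, s.2.2 - v))))
    init
  let last := (PySem.List.pyGet? hyp (-1)).getD 0
  states.map (fun s => s.1 ++ [if s.2.1 = 0 then max s.2.2 (-last) else s.2.1])

-- ===== PRECONDITION & SPEC =====
-- Pre_ excludes inputs on which Python raises IndexError: empty hyp (hyp[0]/hyp[-1]) and
-- pm_pair shorter than 2; A still returns on ([x],[p]) with p ≠ 0 only because its base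
-- case never evaluates pm_pair[1] there — an accident of lazy evaluation — and B's
-- worklist naturally raises on such pm_pair.
def Pre_helper_abs_sum (hyp : List Int) (pm_pair : List Int) : Prop :=
  hyp ≠ [] ∧ 2 ≤ pm_pair.length
instance (hyp : List Int) (pm_pair : List Int) : Decidable (Pre_helper_abs_sum hyp pm_pair) := by
  unfold Pre_helper_abs_sum; infer_instance
def pvWitness_helper_abs_sum : List Int × List Int := ([1, 2], [2, -1])

def Spec_helper_abs_sum (hyp : List Int) (pm_pair : List Int) (out : List (List Int)) : Prop := out = helper_abs_sum_alt hyp pm_pair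
instance (hyp : List Int) (pm_pair : List Int) (out : List (List Int)) : Decidable (Spec_helper_abs_sum hyp pm_pair out) := by unfold Spec_helper_abs_sum; infer_instance

-- ===== CLAIM (what is proved, stated in full; the proofs are below) =====
def Claim_equal_helper_abs_sum : Prop := ∀ (hyp : List Int) (pm_pair : List Int), Dom_helper_abs_sum hyp pm_pair → Pre_helper_abs_sum hyp pm_pair → Spec_helper_abs_sum hyp pm_pair (helper_abs_sum hyp pm_pair)

-- ===== LEMMAS AND PROOFS =====

lemma pyget0 (a b : Int) : (PySem.List.pyGet? ([a, b] : List Int) 0).getD 0 = a := by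
  simp [PySem.List.pyGet?, PySem.List.pyIdx?]

lemma pyget1 (a b : Int) : (PySem.List.pyGet? ([a, b] : List Int) 1).getD 0 = b := by
  simp [PySem.List.pyGet?, PySem.List.pyIdx?]

lemma pyget0' (a b : Int) (rest : List Int) : (PySem.List.pyGet? (a :: b :: rest) 0).getD 0 = a := by
  simp [PySem.List.pyGet?, PySem.List.pyIdx?, show (0:Int) ≤ (rest.length:Int) + 1 by positivity]

lemma pyget1' (a b : Int) (rest : List Int) : (PySem.List.pyGet? (a :: b :: rest) 1).getD 0 = b := by
  simp [PySem.List.pyGet?, PySem.List.pyIdx?]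

-- A on a length-≥2 hyp, rewritten from its foldl of appends to a flatMap
lemma helper_abs_sum_cons_cons (h h2 : Int) (t2 : List Int) (p0 p1 : Int) :
    helper_abs_sum (h :: h2 :: t2) [p0, p1]
      = (PySem.List.pyRange (max (-1 * h) p1) (p0 + 1) 1).flatMap (fun val =>
          if |val| = val then (helper_abs_sum (h2 :: t2) [p0 - val, p1]).map (fun perm => val :: perm)
          else (helper_abs_sum (h2 :: t2) [p0, p1 - val]).map (fun perm => val :: perm)) := by
  have hc : List.foldl (fun permlist val =>
        if |val| = val then permlist ++ (helper_abs_sum (h2 :: t2) [p0 - val, p1]).map (fun perm => val :: perm)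
        else permlist ++ (helper_abs_sum (h2 :: t2) [p0, p1 - val]).map (fun perm => val :: perm)) []
        (PySem.List.pyRange (max (-1 * h) p1) (p0 + 1) 1)
      = List.foldl (fun acc val => acc ++
        (if |val| = val then (helper_abs_sum (h2 :: t2) [p0 - val, p1]).map (fun perm => val :: perm)
         else (helper_abs_sum (h2 :: t2) [p0, p1 - val]).map (fun perm => val :: perm))) []
        (PySem.List.pyRange (max (-1 * h) p1) (p0 + 1) 1) :=
    PySem.List.foldl_congr_mem _ _ _ _ (by intro acc x _; by_cases hx : |x| = x <;> simp [hx])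
  rw [helper_abs_sum]
  simp only [pyget0, pyget1]
  rw [hc, PySem.List.foldl_append_eq_flatMap]
  simp
  simp

-- B's per-position expansion of one state, its per-level step and its finalizer
def pvExpand (h : Int) (s : List Int × Int × Int) : List (List Int × Int × Int) :=
  (PySem.List.pyRange (max (-h) s.2.2) (s.2.1 + 1) 1).map (fun v =>
    if v ≥ 0 then (s.1 ++ [v], s.2.1 - v, s.2.2) else (s.1 ++ [v], s.2.1, s.2.2 - v))

def pvStep (states : List (List Int × Int × Int)) (h : Int) : List (List Int × Int × Int) :=
  states.flatMap (pvExpand h)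

def pvFin (last : Int) (s : List Int × Int × Int) : List Int :=
  s.1 ++ [if s.2.1 = 0 then max s.2.2 (-last) else s.2.1]

lemma helper_abs_sum_alt_eq (hyp : List Int) (pm_pair : List Int) :
    helper_abs_sum_alt hyp pm_pair =
      ((PySem.List.slice hyp none (some (-1))).foldl pvStep
        [([], (PySem.List.pyGet? pm_pair 0).getD 0, (PySem.List.pyGet? pm_pair 1).getD 0)]).map
        (pvFin ((PySem.List.pyGet? hyp (-1)).getD 0)) := rfl

-- Key invariant: levelwise expansion then finalization equals, for each state in order,
-- A's DFS result on the remaining suffix prefixed by the state's prefix.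
lemma pv_key (hyp : List Int) (hne : hyp ≠ []) :
    ∀ (states : List (List Int × Int × Int)),
      (hyp.dropLast.foldl pvStep states).map (pvFin ((PySem.List.pyGet? hyp (-1)).getD 0))
        = states.flatMap (fun s => (helper_abs_sum hyp [s.2.1, s.2.2]).map (fun perm => s.1 ++ perm)) := by
  induction hyp with
  | nil => exact absurd rfl hne
  | cons h t ih =>
    intro states
    cases t with
    | nil =>
      simp only [List.dropLast_singleton, List.foldl_nil, PySem.List.pyGet?_neg_one]
      rw [show states.flatMap (fun s => (helper_abs_sum [h] [s.2.1, s.2.2]).map (fun perm => s.1 ++ perm))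
            = states.flatMap (fun s => [pvFin h s]) from
          List.flatMap_congr (fun s _ => by
            by_cases h0 : s.2.1 = 0 <;>
              simp [helper_abs_sum, pvFin, h0])]
      induction states with
      | nil => rfl
      | cons s ss ihs => simp_all
    | cons h2 t2 =>
      have hd : (h :: h2 :: t2 : List Int).dropLast = h :: (h2 :: t2).dropLast := rfl
      have hlast : (PySem.List.pyGet? (h :: h2 :: t2) (-1)) = (PySem.List.pyGet? (h2 :: t2) (-1)) := by
        simp [PySem.List.pyGet?_neg_one, List.getLast?_cons_cons]
      rw [hd, List.foldl_cons, hlast, ih (by simp) (pvStep states h), pvStep, List.flatMap_assoc]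
      refine List.flatMap_congr ?_
      rintro ⟨pre, p0, p1⟩ _
      show (pvExpand h (pre, p0, p1)).flatMap _ = _
      rw [pvExpand, List.flatMap_map, helper_abs_sum_cons_cons, List.map_flatMap,
        show (-1 * h) = -h by ring]
      refine List.flatMap_congr ?_
      intro v _
      by_cases hv : 0 ≤ v
      · have : |v| = v := abs_of_nonneg hv
        simp only [hv, this, if_pos]
        simp [List.map_map, Function.comp_def]
      · have : ¬ (|v| = v) := by rw [abs_eq_self]; omega
        simp only [hv, this, if_false]
        simp [List.map_map, Function.comp_def]

lemma helper_abs_sum_take2 (hyp : List Int) (a b : Int) (rest : List Int) :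
    helper_abs_sum hyp (a :: b :: rest) = helper_abs_sum hyp [a, b] := by
  cases hyp with
  | nil => rfl
  | cons h t =>
    cases t with
    | nil => simp only [helper_abs_sum, pyget0', pyget1']
    | cons h2 t2 => simp only [helper_abs_sum, pyget0', pyget1']

-- ===== VERDICT (by name: the statement is the Claim_ definition above) =====
theorem helper_abs_sum_spec : Claim_equal_helper_abs_sum := by
  intro hyp pm_pair _ hpre
  obtain ⟨hne, hlen⟩ := hpre
  obtain ⟨a, b, rest, rfl⟩ : ∃ a b rest, pm_pair = a :: b :: rest := by
    cases pm_pair with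
    | nil => simp at hlen
    | cons a t =>
      cases t with
      | nil => simp at hlen
      | cons b r => exact ⟨a, b, r, rfl⟩
  show helper_abs_sum hyp (a :: b :: rest) = helper_abs_sum_alt hyp (a :: b :: rest)
  have hkey := pv_key hyp hne [([], a, b)]
  rw [helper_abs_sum_take2, helper_abs_sum_alt_eq, PySem.List.slice_to_neg_one,
    pyget0', pyget1', hkey]
  simp
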